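-- pv_equiv track=rewrite | github.com/pypi-data/pypi-mirror-162 | packages/srb_api/srb_api-0.1.tar.gz/srb_api-0.1/srb_api/general/crc16.py | CalcCCITT_crc16
-- ===== SOURCE A (Python) =====
-- def CalcCCITT_crc16(buff={}):
--     crc = 0x0000
--     if buff != 0:
--         for i in buff:
--             c = i
--             q = (crc ^ c) & 0x0f
--             crc = (crc >> 4) ^ (q * 0x1081)
--             q = (crc ^ (c >> 4)) & 0xf
--             crc = (crc >> 4) ^ (q * 0x1081)
--     else:
--         crc = 0
--     return crc
-- ===== SOURCE B (Python) =====
-- # Bit-serial CCITT CRC16: process each element one bit at a time with the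
-- # reflected polynomial 0x8408 (= 0x1081 expressed per-bit), instead of A's
-- # two table-free 4-bit (nibble) rounds per element.
--
-- def CalcCCITT_crc16(buff={}):
--     crc = 0
--     if buff != 0:
--         for i in buff:
--             c = i
--             for _ in range(8):
--                 if (crc ^ c) & 1:
--                     crc = (crc >> 1) ^ 0x8408
--                 else:
--                     crc >>= 1
--                 c >>= 1
--     return crc
-- ===== Notes on version B (the rewrite author's own statement) =====
-- stated objective: alternative
-- what changed: Replaces A's two 4-bit (nibble) rounds per element with polynomial constant 0x1081 by the classic bit-serial CRC loop: eight single-bit rounds per element using the reflected polynomial 0x8408.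
import Mathlib
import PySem

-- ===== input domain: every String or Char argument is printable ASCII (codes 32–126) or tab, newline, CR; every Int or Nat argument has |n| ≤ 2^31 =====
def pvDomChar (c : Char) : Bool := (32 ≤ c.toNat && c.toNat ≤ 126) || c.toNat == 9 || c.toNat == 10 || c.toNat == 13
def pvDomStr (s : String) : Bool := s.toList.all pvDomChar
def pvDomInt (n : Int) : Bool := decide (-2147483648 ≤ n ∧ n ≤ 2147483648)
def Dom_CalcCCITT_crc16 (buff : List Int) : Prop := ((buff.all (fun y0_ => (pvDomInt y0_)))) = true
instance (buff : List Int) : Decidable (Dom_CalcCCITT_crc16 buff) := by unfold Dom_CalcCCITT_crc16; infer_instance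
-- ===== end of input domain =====

-- B replaces A's two per-element 4-bit (nibble) rounds with polynomial constant 0x1081 by the
-- classic bit-serial CRC loop: eight single-bit rounds per element with the reflected
-- polynomial 0x8408; same checksum, a different decomposition of the same cost.

-- ===== PORT A =====
-- loop body of A: two nibble rounds over crc with byte c
def pvStepA (crc c : Int) : Int :=
  let q1 := PySem.Int.band (PySem.Int.bxor crc c) 0x0f
  let crc1 := PySem.Int.bxor (crc >>> (4 : Nat)) (q1 * 0x1081)
  let q2 := PySem.Int.band (PySem.Int.bxor crc1 (c >>> (4 : Nat))) 0xf
  PySem.Int.bxor (crc1 >>> (4 : Nat)) (q2 * 0x1081)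

-- A's `if buff != 0` is always True for a list argument (a Python list never equals int 0),
-- so the port is just A's loop from crc = 0
def CalcCCITT_crc16 (buff : List Int) : Int := buff.foldl pvStepA 0

-- ===== PORT B =====
-- body of Source B's inner `for _ in range(8)` loop: one single-bit round on the state (crc, c)
def pvBitRound (s : Int × Int) : Int × Int :=
  (if PySem.Int.band (PySem.Int.bxor s.1 s.2) 1 ≠ 0 then
      PySem.Int.bxor (s.1 >>> (1 : Nat)) 0x8408
    else s.1 >>> (1 : Nat),
   s.2 >>> (1 : Nat))

-- B's `if buff != 0` is likewise always True for a list, so B is the nested loop from crc = 0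
def CalcCCITT_crc16_alt (buff : List Int) : Int :=
  buff.foldl (fun crc i =>
    ((PySem.List.pyRange 0 8 1).foldl (fun s _ => pvBitRound s) (crc, i)).1) 0

-- ===== PRECONDITION & SPEC =====
def Spec_CalcCCITT_crc16 (buff : List Int) (out : Int) : Prop := out = CalcCCITT_crc16_alt buff
instance (buff : List Int) (out : Int) : Decidable (Spec_CalcCCITT_crc16 buff out) := by unfold Spec_CalcCCITT_crc16; infer_instance

-- ===== CLAIM (what is proved, stated in full; the proofs are below) =====
def Claim_equal_CalcCCITT_crc16 : Prop := ∀ (buff : List Int), Dom_CalcCCITT_crc16 buff → Spec_CalcCCITT_crc16 buff (CalcCCITT_crc16 buff)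

-- ===== LEMMAS AND PROOFS =====

-- Nat model of A's two nibble rounds (0x1081 = 4225)
def pvStepN (x b : Nat) : Nat :=
  let q1 := (x ^^^ b) &&& 15
  let x1 := (x >>> 4) ^^^ (q1 * 4225)
  let q2 := (x1 ^^^ (b >>> 4)) &&& 15
  (x1 >>> 4) ^^^ (q2 * 4225)

-- Nat model of one single-bit round (0x8408 = 33800)
def pvBitN (x t : Nat) : Nat :=
  if (x ^^^ t) &&& 1 = 1 then (x >>> 1) ^^^ 33800 else x >>> 1

-- n single-bit rounds consuming the low bits of b
def pvBits (n x b : Nat) : Nat :=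
  match n with
  | 0 => x
  | n + 1 => pvBits n (pvBitN x (b &&& 1)) (b >>> 1)

-- Int recursion matching the inner fold of the B port
def pvLoopB (n : Nat) (s : Int × Int) : Int × Int :=
  match n with
  | 0 => s
  | n + 1 => pvLoopB n (pvBitRound s)

-- low byte of a Python int, as Python computes c & 0xff
def pvByte (c : Int) : Nat := (c % 256).toNat

-- ---- generic Nat bit lemmas ----
theorem pv_xor_mod (k a b : Nat) : (a ^^^ b) % 2 ^ k = (a % 2 ^ k) ^^^ (b % 2 ^ k) := by
  apply Nat.eq_of_testBit_eq
  intro i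
  simp [Nat.testBit_mod_two_pow, Nat.testBit_xor]
  by_cases hi : i < k <;> simp [hi]

theorem pv_shiftRight_xor (a b n : Nat) : (a ^^^ b) >>> n = (a >>> n) ^^^ (b >>> n) := by
  apply Nat.eq_of_testBit_eq
  intro i
  simp [Nat.testBit_shiftRight, Nat.testBit_xor]

theorem pv_and_xor (a b m : Nat) : (a ^^^ b) &&& m = (a &&& m) ^^^ (b &&& m) := by
  apply Nat.eq_of_testBit_eq
  intro i
  simp [Nat.testBit_and, Nat.testBit_xor]
  by_cases h : m.testBit i <;> simp [h]

theorem pv_mod_shiftRight (n : Nat) : (n % 256) >>> 4 = (n >>> 4) % 16 := by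
  apply Nat.eq_of_testBit_eq
  intro i
  have h256 : (256 : Nat) = 2 ^ 8 := rfl
  have h16 : (16 : Nat) = 2 ^ 4 := rfl
  rw [h256, h16]
  simp only [Nat.testBit_shiftRight, Nat.testBit_mod_two_pow]
  by_cases hi : i < 4
  · have h2 : 4 + i < 8 := by omega
    simp [hi, h2]
  · have h2 : ¬ 4 + i < 8 := by omega
    simp [hi, h2]

theorem pv_sub15 : ∀ y : Nat, y < 16 → 15 - y = 15 ^^^ y := by decide
set_option maxRecDepth 8192 in
theorem pv_sub255 : ∀ y : Nat, y < 256 → 255 - y = 255 ^^^ y := by decide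

theorem pv_emod_negSucc (k m : Nat) :
    Int.negSucc m % ((2 ^ k : Nat) : Int) = ((2 ^ k - 1 - m % 2 ^ k : Nat) : Int) := by
  have hp : 0 < 2 ^ k := Nat.two_pow_pos k
  have hm : m % 2 ^ k < 2 ^ k := Nat.mod_lt _ hp
  have hdm : 2 ^ k * (m / 2 ^ k) + m % 2 ^ k = m := Nat.div_add_mod m (2 ^ k)
  have hdm' : ((2 ^ k : Nat) : Int) * ((m / 2 ^ k : Nat) : Int) + ((m % 2 ^ k : Nat) : Int)
      = (m : Int) := by exact_mod_cast hdm
  have key : Int.negSucc m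
      = ((2 ^ k - 1 - m % 2 ^ k : Nat) : Int)
        + ((2 ^ k : Nat) : Int) * (-((m / 2 ^ k : Nat) : Int) - 1) := by
    rw [Int.negSucc_eq]
    have hcast : ((2 ^ k - 1 - m % 2 ^ k : Nat) : Int)
        = ((2 ^ k : Nat) : Int) - 1 - ((m % 2 ^ k : Nat) : Int) := by omega
    rw [hcast]
    linear_combination hdm'
  rw [key, Int.add_mul_emod_self_left]
  exact Int.emod_eq_of_lt (by omega) (by omega)

-- ---- the Int-to-Nat bridge for the masked xors both ports compute ----
theorem pv_band_bxor (k : Nat) (x c : Int) (hx : 0 ≤ x)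
    (hsub : ∀ y : Nat, y < 2 ^ k → 2 ^ k - 1 - y = (2 ^ k - 1) ^^^ y) :
    PySem.Int.band (PySem.Int.bxor x c) ((2 ^ k - 1 : Nat) : Int)
      = (((x.toNat % 2 ^ k) ^^^ (c % ((2 ^ k : Nat) : Int)).toNat : Nat) : Int) := by
  have hp : 0 < 2 ^ k := Nat.two_pow_pos k
  cases c with
  | ofNat n =>
    have hc : (0 : Int) ≤ Int.ofNat n := Int.natCast_nonneg n
    rw [PySem.Int.bxor_of_nonneg hx hc, PySem.Int.band_natCast]
    have h1 : Int.ofNat n % ((2 ^ k : Nat) : Int) = ((n % 2 ^ k : Nat) : Int) := by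
      rw [Int.ofNat_eq_natCast]
      push_cast
      rfl
    rw [h1]
    have h2 : (Int.ofNat n).toNat = n := rfl
    rw [h2, Int.toNat_natCast]
    congr 1
    rw [Nat.and_two_pow_sub_one_eq_mod, pv_xor_mod]
  | negSucc m =>
    have hbx : PySem.Int.bxor x (Int.negSucc m) = Int.negSucc (x.toNat ^^^ m) := by
      rw [PySem.Int.bxor]
      have hneg : ¬ (0 : Int) ≤ Int.negSucc m := by
        simp
      simp only [hx, hneg, if_false, ite_true]
      have hm1 : (-(Int.negSucc m) - 1).toNat = m := by
        rw [Int.negSucc_eq]; omega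
      rw [hm1, Int.negSucc_eq]
      ring
    rw [hbx]
    have hband : PySem.Int.band (Int.negSucc (x.toNat ^^^ m)) ((2 ^ k - 1 : Nat) : Int)
        = ((2 ^ k - 1 - ((2 ^ k - 1) &&& (x.toNat ^^^ m)) : Nat) : Int) := by
      rw [PySem.Int.band]
      have hneg : ¬ (0 : Int) ≤ Int.negSucc (x.toNat ^^^ m) := by
        simp
      have hM : (0 : Int) ≤ ((2 ^ k - 1 : Nat) : Int) := by positivity
      simp only [hneg, hM, if_false, ite_true]
      have h1 : (-(Int.negSucc (x.toNat ^^^ m)) - 1).toNat = x.toNat ^^^ m := by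
        rw [Int.negSucc_eq]; omega
      rw [h1, Int.toNat_natCast]
    rw [hband, pv_emod_negSucc k m, Int.toNat_natCast]
    congr 1
    have h1 : (2 ^ k - 1) &&& (x.toNat ^^^ m) = (x.toNat ^^^ m) % 2 ^ k := by
      rw [Nat.and_comm, Nat.and_two_pow_sub_one_eq_mod]
    rw [h1, pv_xor_mod]
    have ha : x.toNat % 2 ^ k < 2 ^ k := Nat.mod_lt _ hp
    have hb : m % 2 ^ k < 2 ^ k := Nat.mod_lt _ hp
    have hxy : x.toNat % 2 ^ k ^^^ m % 2 ^ k < 2 ^ k := Nat.xor_lt_two_pow ha hb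
    rw [hsub _ hxy, hsub _ hb]
    rw [Nat.xor_comm (2 ^ k - 1) (x.toNat % 2 ^ k ^^^ m % 2 ^ k), Nat.xor_assoc,
      Nat.xor_comm (m % 2 ^ k) (2 ^ k - 1)]

-- specialisations with the literal masks of the ports
theorem pv_band_bxor_15 (x c : Int) (hx : 0 ≤ x) :
    PySem.Int.band (PySem.Int.bxor x c) 15
      = ((x.toNat % 16 ^^^ (c % (16 : Int)).toNat : Nat) : Int) := by
  have := pv_band_bxor 4 x c hx (fun y hy => pv_sub15 y hy)
  norm_num at this ⊢
  exact this

theorem pv_band_bxor_1 (x c : Int) (hx : 0 ≤ x) :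
    PySem.Int.band (PySem.Int.bxor x c) 1
      = ((x.toNat % 2 ^^^ (c % (2 : Int)).toNat : Nat) : Int) := by
  have := pv_band_bxor 1 x c hx (by decide)
  norm_num at this ⊢
  exact this

-- byte/nibble plumbing
theorem pv_byte_mod16 (c : Int) : pvByte c % 16 = (c % (16 : Int)).toNat := by
  unfold pvByte
  omega

theorem pv_shift4_emod (c : Int) : (c >>> (4 : Nat)) % (16 : Int) = ((pvByte c >>> 4 : Nat) : Int) := by
  cases c with
  | ofNat n =>
    have h1 : (Int.ofNat n) >>> (4 : Nat) = ((n >>> 4 : Nat) : Int) := by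
      rw [Int.ofNat_eq_natCast, ← Int.natCast_shiftRight]
    rw [h1]
    have h2 : ((n >>> 4 : Nat) : Int) % (16 : Int) = (((n >>> 4) % 16 : Nat) : Int) := by
      push_cast
      rfl
    rw [h2]
    have h3 : pvByte (Int.ofNat n) = n % 256 := by
      unfold pvByte
      rw [Int.ofNat_eq_natCast]
      omega
    rw [h3, pv_mod_shiftRight]
  | negSucc m =>
    rw [Int.negSucc_shiftRight]
    have h1 : Int.negSucc (m >>> 4) % (16 : Int) = ((15 - (m >>> 4) % 16 : Nat) : Int) := by
      have := pv_emod_negSucc 4 (m >>> 4)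
      norm_num at this
      exact_mod_cast this
    rw [h1]
    have h2 : pvByte (Int.negSucc m) = 255 - m % 256 := by
      unfold pvByte
      have := pv_emod_negSucc 8 m
      norm_num at this
      rw [this, Int.toNat_natCast]
    rw [h2]
    have hm : m % 256 < 256 := Nat.mod_lt _ (by norm_num)
    have hy : (m >>> 4) % 16 < 16 := Nat.mod_lt _ (by norm_num)
    have hfin : (255 - m % 256) >>> 4 = 15 - (m >>> 4) % 16 := by
      rw [pv_sub255 _ hm, pv_shiftRight_xor]
      have h255 : (255 : Nat) >>> 4 = 15 := rfl
      rw [h255, pv_mod_shiftRight, pv_sub15 _ hy]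
    rw [hfin]

theorem pv_mask16 (a b : Nat) : (a ^^^ b) &&& 15 = (a % 16) ^^^ (b % 16) := by
  have h15 : (15 : Nat) = 2 ^ 4 - 1 := rfl
  have h16 : (16 : Nat) = 2 ^ 4 := rfl
  rw [h15, Nat.and_two_pow_sub_one_eq_mod, pv_xor_mod, ← h16]

-- A's loop body equals the Nat model on the low byte
theorem pv_stepA_eq (x c : Int) (hx : 0 ≤ x) :
    pvStepA x c = ((pvStepN x.toNat (pvByte c) : Nat) : Int) := by
  have hb : pvByte c < 256 := by unfold pvByte; omega
  have hx4 : x >>> (4 : Nat) = ((x.toNat >>> 4 : Nat) : Int) := by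
    conv_lhs => rw [← Int.toNat_of_nonneg hx]
    exact (Int.natCast_shiftRight _ 4).symm
  have hq1 : PySem.Int.band (PySem.Int.bxor x c) 15
      = (((x.toNat ^^^ pvByte c) &&& 15 : Nat) : Int) := by
    rw [pv_band_bxor_15 x c hx, pv_mask16, pv_byte_mod16]
  simp only [pvStepA, pvStepN]
  rw [hq1, hx4]
  have hmul : ∀ q : Nat, ((q : Nat) : Int) * 4225 = ((q * 4225 : Nat) : Int) := by
    intro q; push_cast; ring
  rw [hmul, PySem.Int.bxor_natCast]
  set x1N : Nat := x.toNat >>> 4 ^^^ ((x.toNat ^^^ pvByte c) &&& 15) * 4225 with hx1N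
  have hnib : pvByte c >>> 4 < 16 := by
    rw [Nat.shiftRight_eq_div_pow]; omega
  have hq2 : PySem.Int.band (PySem.Int.bxor ((x1N : Nat) : Int) (c >>> (4 : Nat))) 15
      = (((x1N ^^^ (pvByte c >>> 4)) &&& 15 : Nat) : Int) := by
    rw [pv_band_bxor_15 _ _ (Int.natCast_nonneg _), pv_shift4_emod c, Int.toNat_natCast,
      Int.toNat_natCast, pv_mask16, Nat.mod_eq_of_lt hnib]
  rw [hq2]
  have hx1s : ((x1N : Nat) : Int) >>> (4 : Nat) = ((x1N >>> 4 : Nat) : Int) :=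
    (Int.natCast_shiftRight _ 4).symm
  rw [hmul, hx1s, PySem.Int.bxor_natCast]

-- ---- Nat-level structure of A's byte step ----
theorem pv_split_shift (x : Nat) : x >>> 4 = ((x >>> 8) <<< 4) ^^^ ((x % 256) >>> 4) := by
  apply Nat.eq_of_testBit_eq
  intro i
  have h256 : (256 : Nat) = 2 ^ 8 := rfl
  rw [h256]
  simp only [Nat.testBit_shiftRight, Nat.testBit_xor, Nat.testBit_shiftLeft,
    Nat.testBit_mod_two_pow]
  by_cases hi : i < 4
  · have h1 : ¬ i ≥ 4 := by omega
    have h2 : 4 + i < 8 := by omega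
    simp [h1, h2]
  · have h1 : i ≥ 4 := by omega
    have h2 : ¬ 4 + i < 8 := by omega
    have h3 : 8 + (i - 4) = 4 + i := by omega
    simp [h1, h2, h3]

theorem pv_mask_mod (x b : Nat) : (x ^^^ b) &&& 15 = ((x % 256) ^^^ b) &&& 15 := by
  apply Nat.eq_of_testBit_eq
  intro i
  have h256 : (256 : Nat) = 2 ^ 8 := rfl
  have h15 : (15 : Nat) = 2 ^ 4 - 1 := rfl
  rw [h256, h15]
  simp only [Nat.testBit_and, Nat.testBit_xor, Nat.testBit_mod_two_pow,
    Nat.testBit_two_pow_sub_one]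
  by_cases hi : i < 4
  · have h2 : i < 8 := by omega
    simp [hi, h2]
  · simp [hi]

theorem pv_high_mask (h w : Nat) : ((h <<< 4) ^^^ w) &&& 15 = w &&& 15 := by
  apply Nat.eq_of_testBit_eq
  intro i
  have h15 : (15 : Nat) = 2 ^ 4 - 1 := rfl
  rw [h15]
  simp only [Nat.testBit_and, Nat.testBit_xor, Nat.testBit_shiftLeft,
    Nat.testBit_two_pow_sub_one]
  by_cases hi : i < 4
  · have h1 : ¬ i ≥ 4 := by omega
    simp [hi, h1]
  · simp [hi]

theorem pv_high_shift (h w : Nat) : ((h <<< 4) ^^^ w) >>> 4 = h ^^^ (w >>> 4) := by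
  apply Nat.eq_of_testBit_eq
  intro i
  simp only [Nat.testBit_shiftRight, Nat.testBit_xor, Nat.testBit_shiftLeft]
  have h1 : 4 + i ≥ 4 := by omega
  have h2 : 4 + i - 4 = i := by omega
  simp [h1, h2]

-- second nibble round with the high part (h <<< 4) split off
theorem pv_round2 (h w b : Nat) :
    (((h <<< 4) ^^^ w) >>> 4) ^^^ (((((h <<< 4) ^^^ w) ^^^ b) &&& 15) * 4225)
      = h ^^^ ((w >>> 4) ^^^ (((w ^^^ b) &&& 15) * 4225)) := by
  rw [pv_high_shift, Nat.xor_assoc (h <<< 4) w b, pv_high_mask, Nat.xor_assoc]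

-- shift the high byte out: one byte-step acts on the low byte only
theorem pv_stepN_split (x b : Nat) : pvStepN x b = (x >>> 8) ^^^ pvStepN (x % 256) b := by
  simp only [pvStepN]
  rw [pv_mask_mod x b, pv_split_shift x, Nat.xor_assoc]
  exact pv_round2 (x >>> 8) (((x % 256) >>> 4) ^^^ (((x % 256 ^^^ b) &&& 15) * 4225)) (b >>> 4)

-- xor-linearity: a byte-step on l is A's step on crc 0 with byte l ^^^ b
theorem pv_stepN_xor (l b : Nat) (hl : l < 256) : pvStepN l b = pvStepN 0 (l ^^^ b) := by
  simp only [pvStepN, Nat.zero_shiftRight, Nat.zero_xor]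
  have h0 : l >>> 4 >>> 4 = 0 := by
    rw [← Nat.shiftRight_add, Nat.shiftRight_eq_div_pow]
    omega
  rw [pv_shiftRight_xor (l >>> 4), h0, Nat.zero_xor, pv_shiftRight_xor l b]
  congr 2
  rw [Nat.xor_comm (l >>> 4) ((((l ^^^ b) &&& 15) * 4225)), Nat.xor_assoc]

-- nibble multiplication by 4225 = 0x1081 is xor-linear (disjoint bit groups)
set_option maxRecDepth 100000 in
theorem pv_mul_xor : ∀ q1 : Nat, q1 < 16 → ∀ q2 : Nat, q2 < 16 →
    (q1 ^^^ q2) * 4225 = (q1 * 4225) ^^^ (q2 * 4225) := by decide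

-- xor is associative-commutative: the 4-element shuffle used below
theorem pv_xor_perm (a b c d : Nat) : (a ^^^ b) ^^^ (c ^^^ d) = (a ^^^ c) ^^^ (b ^^^ d) := by
  apply Nat.eq_of_testBit_eq; intro i
  simp only [Nat.testBit_xor]
  generalize a.testBit i = p; generalize b.testBit i = q
  generalize c.testBit i = r; generalize d.testBit i = s
  cases p <;> cases q <;> cases r <;> cases s <;> rfl

-- stepN at crc 0 is xor-linear in the byte
theorem pv_stepN0_xor (u v : Nat) : pvStepN 0 (u ^^^ v) = pvStepN 0 u ^^^ pvStepN 0 v := by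
  have h15 : ∀ w : Nat, w &&& 15 < 16 := fun w => lt_of_le_of_lt Nat.and_le_right (by norm_num)
  simp only [pvStepN, Nat.zero_shiftRight, Nat.zero_xor]
  rw [pv_and_xor u v 15, pv_mul_xor _ (h15 u) _ (h15 v), pv_shiftRight_xor u v 4,
    pv_xor_perm, pv_and_xor, pv_mul_xor _ (h15 _) _ (h15 _), pv_shiftRight_xor,
    pv_xor_perm]

-- ---- bit-serial Nat model: structure lemmas ----
theorem pv_high_mask1 (h w : Nat) : ((h <<< 1) ^^^ w) &&& 1 = w &&& 1 := by
  apply Nat.eq_of_testBit_eq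
  intro i
  have h1 : (1 : Nat) = 2 ^ 1 - 1 := rfl
  rw [h1]
  simp only [Nat.testBit_and, Nat.testBit_xor, Nat.testBit_shiftLeft,
    Nat.testBit_two_pow_sub_one]
  by_cases hi : i < 1
  · have h2 : ¬ i ≥ 1 := by omega
    simp [hi, h2]
  · simp [hi]

theorem pv_high_shift1 (h w : Nat) : ((h <<< 1) ^^^ w) >>> 1 = h ^^^ (w >>> 1) := by
  apply Nat.eq_of_testBit_eq
  intro i
  simp only [Nat.testBit_shiftRight, Nat.testBit_xor, Nat.testBit_shiftLeft]
  have h1 : 1 + i ≥ 1 := by omega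
  have h2 : 1 + i - 1 = i := by omega
  simp [h1, h2]

theorem pv_bitN_high (h w t : Nat) : pvBitN ((h <<< 1) ^^^ w) t = h ^^^ pvBitN w t := by
  simp only [pvBitN, Nat.xor_assoc (h <<< 1) w t, pv_high_mask1 h (w ^^^ t), pv_high_shift1]
  split_ifs with hc
  · rw [Nat.xor_assoc]
  · rfl

theorem pv_bits_high : ∀ (n h w b : Nat), pvBits n ((h <<< n) ^^^ w) b = h ^^^ pvBits n w b := by
  intro n
  induction n with
  | zero => intro h w b; simp [pvBits]
  | succ n ih =>
    intro h w b
    show pvBits n (pvBitN ((h <<< (n + 1)) ^^^ w) (b &&& 1)) (b >>> 1)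
        = h ^^^ pvBits n (pvBitN w (b &&& 1)) (b >>> 1)
    rw [Nat.shiftLeft_add h n 1, pv_bitN_high (h <<< n) w (b &&& 1), ih]

theorem pv_split_shift8 (x : Nat) : x = ((x >>> 8) <<< 8) ^^^ (x % 256) := by
  apply Nat.eq_of_testBit_eq
  intro i
  have h256 : (256 : Nat) = 2 ^ 8 := rfl
  rw [h256]
  simp only [Nat.testBit_xor, Nat.testBit_shiftLeft, Nat.testBit_shiftRight,
    Nat.testBit_mod_two_pow]
  by_cases hi : i < 8
  · have h1 : ¬ i ≥ 8 := by omega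
    simp [h1, hi]
  · have h1 : i ≥ 8 := by omega
    have h3 : 8 + (i - 8) = i := by omega
    simp [h1, hi, h3]

theorem pv_bits_split (x b : Nat) : pvBits 8 x b = (x >>> 8) ^^^ pvBits 8 (x % 256) b := by
  conv_lhs => rw [pv_split_shift8 x]
  exact pv_bits_high 8 (x >>> 8) (x % 256) b

-- single-bit round is xor-bilinear
theorem pv_bitN_xor (x1 x2 t1 t2 : Nat) :
    pvBitN (x1 ^^^ x2) (t1 ^^^ t2) = pvBitN x1 t1 ^^^ pvBitN x2 t2 := by
  have hle1 : (x1 ^^^ t1) &&& 1 ≤ 1 := Nat.and_le_right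
  have hle2 : (x2 ^^^ t2) &&& 1 ≤ 1 := Nat.and_le_right
  have hc : ((x1 ^^^ x2) ^^^ (t1 ^^^ t2)) &&& 1
      = ((x1 ^^^ t1) &&& 1) ^^^ ((x2 ^^^ t2) &&& 1) := by
    rw [pv_xor_perm, pv_and_xor]
  simp only [pvBitN, hc]
  by_cases h1 : (x1 ^^^ t1) &&& 1 = 1
  · by_cases h2 : (x2 ^^^ t2) &&& 1 = 1
    · rw [if_neg (by rw [h1, h2]; decide), if_pos h1, if_pos h2, pv_shiftRight_xor,
        pv_xor_perm, Nat.xor_self, Nat.xor_zero]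
    · have h2' : (x2 ^^^ t2) &&& 1 = 0 := by omega
      rw [if_pos (by rw [h1, h2']; decide), if_pos h1, if_neg h2, pv_shiftRight_xor,
        Nat.xor_assoc, Nat.xor_comm (x2 >>> 1) 33800, ← Nat.xor_assoc]
  · have h1' : (x1 ^^^ t1) &&& 1 = 0 := by omega
    by_cases h2 : (x2 ^^^ t2) &&& 1 = 1
    · rw [if_pos (by rw [h1', h2]; decide), if_neg h1, if_pos h2, pv_shiftRight_xor,
        Nat.xor_assoc]
    · have h2' : (x2 ^^^ t2) &&& 1 = 0 := by omega
      rw [if_neg (by rw [h1', h2']; decide), if_neg h1, if_neg h2, pv_shiftRight_xor]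

theorem pv_bits_xor : ∀ (n x1 x2 b1 b2 : Nat),
    pvBits n (x1 ^^^ x2) (b1 ^^^ b2) = pvBits n x1 b1 ^^^ pvBits n x2 b2 := by
  intro n
  induction n with
  | zero => intro x1 x2 b1 b2; rfl
  | succ n ih =>
    intro x1 x2 b1 b2
    show pvBits n (pvBitN (x1 ^^^ x2) ((b1 ^^^ b2) &&& 1)) ((b1 ^^^ b2) >>> 1) = _
    rw [pv_and_xor b1 b2 1, pv_shiftRight_xor b1 b2 1, pv_bitN_xor, ih]
    rfl

-- the two byte steps agree on the separated pure inputs (kernel evaluation)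
set_option maxRecDepth 200000 in
theorem pv_bits_eq_stepN_left : ∀ l : Nat, l < 256 → pvBits 8 l 0 = pvStepN l 0 := by decide
set_option maxRecDepth 200000 in
theorem pv_bits_eq_stepN_right : ∀ b : Nat, b < 256 → pvBits 8 0 b = pvStepN 0 b := by decide

-- eight single-bit rounds = A's two nibble rounds
theorem pv_bits_eq_stepN (x b : Nat) (hb : b < 256) : pvBits 8 x b = pvStepN x b := by
  rw [pv_bits_split, pv_stepN_split]
  congr 1
  have hl : x % 256 < 256 := Nat.mod_lt _ (by norm_num)
  have h0 : pvBits 8 (x % 256) b = pvBits 8 ((x % 256) ^^^ 0) (0 ^^^ b) := by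
    rw [Nat.xor_zero, Nat.zero_xor]
  rw [h0, pv_bits_xor, pv_bits_eq_stepN_left _ hl, pv_bits_eq_stepN_right _ hb]
  have h1 : pvStepN (x % 256) 0 = pvStepN 0 (x % 256) := by
    rw [pv_stepN_xor _ 0 hl, Nat.xor_zero]
  rw [h1, ← pv_stepN0_xor, ← pv_stepN_xor _ _ hl]

-- ---- Int-to-Nat bridge for B's inner loop ----
theorem pv_int_shr_shr (c : Int) (a b : Nat) : (c >>> a) >>> b = c >>> (a + b) := by
  cases c with
  | ofNat n =>
    rw [Int.ofNat_eq_natCast, ← Int.natCast_shiftRight, ← Int.natCast_shiftRight,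
      ← Int.natCast_shiftRight, Nat.shiftRight_add]
  | negSucc m =>
    rw [Int.negSucc_shiftRight, Int.negSucc_shiftRight, Int.negSucc_shiftRight,
      Nat.shiftRight_add]

theorem pv_int_shr_zero (c : Int) : c >>> (0 : Nat) = c := by
  cases c with
  | ofNat n => rw [Int.ofNat_eq_natCast, ← Int.natCast_shiftRight, Nat.shiftRight_zero]
  | negSucc m => rw [Int.negSucc_shiftRight, Nat.shiftRight_zero]

-- bit j of c (as Python computes it) is bit j of the low byte, for j < 8
set_option maxRecDepth 100000 in
theorem pv_rel_byte (c : Int) : ∀ j : Nat, j < 8 →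
    (c >>> (j : Nat)) % (2 : Int) = (((pvByte c >>> j) % 2 : Nat) : Int) := by
  intro j hj
  cases c with
  | ofNat n =>
    have h1 : (Int.ofNat n) >>> (j : Nat) = ((n >>> j : Nat) : Int) := by
      rw [Int.ofNat_eq_natCast, ← Int.natCast_shiftRight]
    rw [h1]
    have h2 : ((n >>> j : Nat) : Int) % (2 : Int) = (((n >>> j) % 2 : Nat) : Int) := by
      push_cast
      rfl
    rw [h2]
    have h3 : pvByte (Int.ofNat n) = n % 256 := by
      unfold pvByte
      rw [Int.ofNat_eq_natCast]
      omega
    rw [h3]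
    congr 1
    rw [Nat.shiftRight_eq_div_pow, Nat.shiftRight_eq_div_pow]
    interval_cases j <;> omega
  | negSucc m =>
    rw [Int.negSucc_shiftRight]
    have h1 : Int.negSucc (m >>> j) % (2 : Int) = ((1 - (m >>> j) % 2 : Nat) : Int) := by
      have := pv_emod_negSucc 1 (m >>> j)
      norm_num at this
      exact_mod_cast this
    rw [h1]
    have h2 : pvByte (Int.negSucc m) = 255 - m % 256 := by
      unfold pvByte
      have := pv_emod_negSucc 8 m
      norm_num at this
      rw [this, Int.toNat_natCast]
    rw [h2]
    congr 1
    rw [Nat.shiftRight_eq_div_pow, Nat.shiftRight_eq_div_pow]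
    interval_cases j <;> omega

-- one Int round equals one Nat round, given agreement on bit 0
theorem pv_bitRound_eq (x c : Int) (b : Nat) (hx : 0 ≤ x)
    (h0 : c % (2 : Int) = ((b % 2 : Nat) : Int)) :
    pvBitRound (x, c) = (((pvBitN x.toNat (b &&& 1) : Nat) : Int), c >>> (1 : Nat)) := by
  have hcond : PySem.Int.band (PySem.Int.bxor x c) 1
      = ((x.toNat % 2 ^^^ b % 2 : Nat) : Int) := by
    rw [pv_band_bxor_1 x c hx, h0, Int.toNat_natCast]
  have hN : (x.toNat ^^^ (b &&& 1)) &&& 1 = x.toNat % 2 ^^^ b % 2 := by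
    rw [pv_and_xor, Nat.and_assoc, Nat.and_self, Nat.and_one_is_mod, Nat.and_one_is_mod]
  have hsh : x >>> (1 : Nat) = ((x.toNat >>> 1 : Nat) : Int) := by
    conv_lhs => rw [← Int.toNat_of_nonneg hx]
    exact (Int.natCast_shiftRight _ 1).symm
  have hxb : x.toNat % 2 ^^^ b % 2 < 2 := by
    have h := Nat.xor_lt_two_pow (show x.toNat % 2 < 2 ^ 1 by omega)
      (show b % 2 < 2 ^ 1 by omega)
    simpa using h
  simp only [pvBitRound, pvBitN, hcond, hN, hsh]
  by_cases hone : x.toNat % 2 ^^^ b % 2 = 1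
  · rw [if_pos (by rw [hone]; decide), if_pos hone,
      show (33800 : Int) = ((33800 : Nat) : Int) from rfl, PySem.Int.bxor_natCast]
  · have h0' : x.toNat % 2 ^^^ b % 2 = 0 := by omega
    rw [if_neg (by rw [h0']; decide), if_neg hone]

theorem pv_loopB_eq : ∀ (n : Nat) (x c : Int) (b : Nat), 0 ≤ x →
    (∀ j : Nat, j < n → (c >>> (j : Nat)) % (2 : Int) = (((b >>> j) % 2 : Nat) : Int)) →
    (pvLoopB n (x, c)).1 = ((pvBits n x.toNat b : Nat) : Int) := by
  intro n
  induction n with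
  | zero =>
    intro x c b hx _
    simp only [pvLoopB, pvBits]
    exact (Int.toNat_of_nonneg hx).symm
  | succ n ih =>
    intro x c b hx hrel
    have h0 : c % (2 : Int) = ((b % 2 : Nat) : Int) := by
      have := hrel 0 (by omega)
      rwa [pv_int_shr_zero, Nat.shiftRight_zero] at this
    show (pvLoopB n (pvBitRound (x, c))).1 = _
    rw [pv_bitRound_eq x c b hx h0]
    have hrel' : ∀ j : Nat, j < n →
        ((c >>> (1 : Nat)) >>> (j : Nat)) % (2 : Int)
          = ((((b >>> 1) >>> j) % 2 : Nat) : Int) := by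
      intro j hjn
      rw [pv_int_shr_shr, ← Nat.shiftRight_add]
      exact hrel (1 + j) (by omega)
    have := ih ((pvBitN x.toNat (b &&& 1) : Nat) : Int) (c >>> (1 : Nat)) (b >>> 1)
      (Int.natCast_nonneg _) hrel'
    rw [this, Int.toNat_natCast]
    rfl

-- the inner fold of the B port is pvLoopB 8
theorem pv_fold_loopB (s : Int × Int) :
    (PySem.List.pyRange 0 8 1).foldl (fun s _ => pvBitRound s) s = pvLoopB 8 s := by
  have h : PySem.List.pyRange 0 8 1 = [0, 1, 2, 3, 4, 5, 6, 7] := by decide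
  rw [h]
  rfl

-- B's loop body equals A's loop body on nonnegative crc
theorem pv_step_eq (x c : Int) (hx : 0 ≤ x) :
    ((PySem.List.pyRange 0 8 1).foldl (fun s _ => pvBitRound s) (x, c)).1 = pvStepA x c := by
  have hb : pvByte c < 256 := by unfold pvByte; omega
  rw [pv_fold_loopB, pv_loopB_eq 8 x c (pvByte c) hx (pv_rel_byte c),
    pv_bits_eq_stepN _ _ hb, ← pv_stepA_eq x c hx]

theorem pv_fold_eq (buff : List Int) (x : Int) (hx : 0 ≤ x) :
    buff.foldl pvStepA x
      = buff.foldl (fun crc i =>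
          ((PySem.List.pyRange 0 8 1).foldl (fun s _ => pvBitRound s) (crc, i)).1) x := by
  induction buff generalizing x with
  | nil => rfl
  | cons c rest ih =>
    simp only [List.foldl_cons]
    rw [pv_step_eq x c hx, pv_stepA_eq x c hx, ih _ (by positivity)]

-- ===== VERDICT (by name: the statement is the Claim_ definition above) =====
theorem CalcCCITT_crc16_spec : Claim_equal_CalcCCITT_crc16 := by
  intro buff _
  show CalcCCITT_crc16 buff = CalcCCITT_crc16_alt buff
  exact pv_fold_eq buff 0 le_rfl
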